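-- pv_equiv track=rewrite | github.com/hyperledger-iroha/iroha | python/norito_py/src/norito/compression.py | select_zstd_level
-- ===== SOURCE A (Python) =====
-- from typing import Final, Optional, Tuple
--
-- _ZSTD_MIN_LEVEL: Final[int] = 1
--
-- _ZSTD_MAX_LEVEL: Final[int] = 22
--
-- _LEVEL_PROFILES: Final[
--     dict[str, Tuple[Tuple[int, Optional[int], int], ...]]
-- ] = {
--     # Prioritise encode speed. Useful for development fixtures where latency matters
--     # more than final size.
--     "fast": (
--         (0, 64 * 1024, 1),
--         (64 * 1024, 512 * 1024, 2),
--         (512 * 1024, 4 * 1024 * 1024, 3),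
--         (4 * 1024 * 1024, None, 4),
--     ),
--     # Matches the current Rust defaults: favour good compression while keeping
--     # encode cost reasonable for mid-sized manifests (< 4 MiB).
--     "balanced": (
--         (0, 64 * 1024, 3),
--         (64 * 1024, 512 * 1024, 5),
--         (512 * 1024, 4 * 1024 * 1024, 7),
--         (4 * 1024 * 1024, None, 9),
--     ),
--     # Trade CPU time for better ratios. Intended for large archival payloads
--     # (e.g., telemetry exports, pin registry snapshots).
--     "compact": (
--         (0, 64 * 1024, 7),
--         (64 * 1024, 512 * 1024, 11),
--         (512 * 1024, 4 * 1024 * 1024, 15),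
--         (4 * 1024 * 1024, None, 19),
--     ),
-- }
--
-- def select_zstd_level(payload_len: int, profile: str = "balanced") -> int:
--     """Select a compression level for the given payload length and profile.
--
--     Args:
--         payload_len: Raw (uncompressed) payload length in bytes.
--         profile: Compression profile hint. Supported values:
--             ``"fast"``, ``"balanced"``, ``"compact"``.
--
--     Returns:
--         Zstandard compression level within the canonical range ``[1, 22]``.
--
--     Raises:
--         ValueError: When *payload_len* is negative or *profile* is unknown.
--     """
--
--     if payload_len < 0:
--         raise ValueError("payload_len must be non-negative")
--     try:
--         buckets = _LEVEL_PROFILES[profile.lower()]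
--     except KeyError as exc:
--         raise ValueError(f"unknown compression profile {profile!r}") from exc
--     for lower, upper, level in buckets:
--         if payload_len >= lower and (upper is None or payload_len < upper):
--             return _clamp_level(level)
--     # Fallback to the most conservative entry (last bucket).
--     return _clamp_level(buckets[-1][2])
--
-- def _clamp_level(level: int) -> int:
--     if not (_ZSTD_MIN_LEVEL <= level <= _ZSTD_MAX_LEVEL):
--         raise ValueError(
--             f"Zstandard level {level} must be between {_ZSTD_MIN_LEVEL} "
--             f"and {_ZSTD_MAX_LEVEL}"
--         )
--     return level
-- ===== SOURCE B (Python) =====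
-- _ZSTD_MIN_LEVEL = 1
-- _ZSTD_MAX_LEVEL = 22
--
-- # One flat level tuple per profile; band index 0..3 is computed arithmetically
-- # from the three shared size thresholds instead of scanning (lower, upper) ranges.
-- _THRESHOLDS = (64 * 1024, 512 * 1024, 4 * 1024 * 1024)
-- _PROFILE_LEVELS = {
--     "fast": (1, 2, 3, 4),
--     "balanced": (3, 5, 7, 9),
--     "compact": (7, 11, 15, 19),
-- }
--
--
-- def select_zstd_level(payload_len: int, profile: str = "balanced") -> int:
--     if payload_len < 0:
--         raise ValueError("payload_len must be non-negative")
--     try: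
--         levels = _PROFILE_LEVELS[profile.lower()]
--     except KeyError as exc:
--         raise ValueError(f"unknown compression profile {profile!r}") from exc
--     idx = sum(1 for t in _THRESHOLDS if payload_len >= t)
--     level = levels[idx]
--     if not (_ZSTD_MIN_LEVEL <= level <= _ZSTD_MAX_LEVEL):
--         raise ValueError(
--             f"Zstandard level {level} must be between {_ZSTD_MIN_LEVEL} "
--             f"and {_ZSTD_MAX_LEVEL}"
--         )
--     return level
-- ===== Notes on version B (the rewrite author's own statement) =====
-- stated objective: simpler
-- what changed: Replaces the linear scan over (lower, upper, level) range triples with a flat 4-level tuple per profile indexed by a band index computed by counting the shared thresholds the payload length reaches; the range table and fallback branch disappear.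
import Mathlib
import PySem

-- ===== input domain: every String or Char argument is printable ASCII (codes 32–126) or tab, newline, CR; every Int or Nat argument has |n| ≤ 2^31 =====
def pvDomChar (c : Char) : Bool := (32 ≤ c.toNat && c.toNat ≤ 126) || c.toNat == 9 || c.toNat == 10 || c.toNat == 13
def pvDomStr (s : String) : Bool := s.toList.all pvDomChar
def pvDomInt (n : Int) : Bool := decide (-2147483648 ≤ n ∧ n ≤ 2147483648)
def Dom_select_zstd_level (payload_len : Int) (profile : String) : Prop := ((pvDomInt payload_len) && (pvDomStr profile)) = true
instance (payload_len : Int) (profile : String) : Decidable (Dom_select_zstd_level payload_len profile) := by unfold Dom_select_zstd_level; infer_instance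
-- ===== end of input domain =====

-- B replaces A's linear scan over (lower, upper, level) range triples with a flat
-- per-profile level tuple indexed by a threshold-count band index (objective: simpler).


-- ===== PORT A =====
-- the _LEVEL_PROFILES dict: profile → tuple of (lower, upper, level) buckets
def pvProfilesA : PySem.Dict String (List (Int × Option Int × Int)) := PySem.Dict.ofList
  [("fast", [(0, some 65536, 1), (65536, some 524288, 2), (524288, some 4194304, 3), (4194304, none, 4)]),
   ("balanced", [(0, some 65536, 3), (65536, some 524288, 5), (524288, some 4194304, 7), (4194304, none, 9)]),
   ("compact", [(0, some 65536, 7), (65536, some 524288, 11), (524288, some 4194304, 15), (4194304, none, 19)])]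

-- _clamp_level: the raise branch is unreachable for every level in the table;
-- Pre_ never admits an input reaching it, 0 stands in for the ValueError
def pvClampA (level : Int) : Int :=
  if 1 ≤ level ∧ level ≤ 22 then level else 0

-- the for-loop over buckets: first matching range, none = fell through
def pvScanA (payload_len : Int) : List (Int × Option Int × Int) → Option Int
  | [] => none
  | (lower, upper, level) :: rest =>
    if payload_len ≥ lower ∧ (upper = none ∨ ∃ u, upper = some u ∧ payload_len < u) then
      some (pvClampA level)
    else pvScanA payload_len rest

def select_zstd_level (payload_len : Int) (profile : String) : Int :=
  if payload_len < 0 then 0   -- ValueError, excluded by Pre_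
  else
    match PySem.Dict.get? pvProfilesA (PySem.Str.lower profile) with
    | none => 0               -- KeyError → ValueError, excluded by Pre_
    | some buckets =>
      match pvScanA payload_len buckets with
      | some r => r
      | none =>               -- fallback: clamp of buckets[-1][2]
        pvClampA ((((PySem.List.pyGet? buckets (-1)).map (fun b => b.2.2)).getD 0))

-- ===== PORT B =====
def pvThresholdsB : List Int := [65536, 524288, 4194304]

def pvLevelsB : PySem.Dict String (List Int) := PySem.Dict.ofList
  [("fast", [1, 2, 3, 4]), ("balanced", [3, 5, 7, 9]), ("compact", [7, 11, 15, 19])]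

def select_zstd_level_alt (payload_len : Int) (profile : String) : Int :=
  if payload_len < 0 then 0   -- ValueError, excluded by Pre_
  else
    match PySem.Dict.get? pvLevelsB (PySem.Str.lower profile) with
    | none => 0               -- KeyError → ValueError, excluded by Pre_
    | some levels =>
      let idx : Int := ((pvThresholdsB.filter (fun t => payload_len ≥ t)).length : Int)
      let level := (PySem.List.pyGet? levels idx).getD 0
      if 1 ≤ level ∧ level ≤ 22 then level else 0

-- ===== PRECONDITION & SPEC =====
-- Pre_: exactly where A returns — nonnegative payload and a known profile (case-insensitive)
def Pre_select_zstd_level (payload_len : Int) (profile : String) : Prop :=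
  0 ≤ payload_len ∧
    (PySem.Str.lower profile = "fast" ∨ PySem.Str.lower profile = "balanced" ∨
      PySem.Str.lower profile = "compact")
instance (payload_len : Int) (profile : String) : Decidable (Pre_select_zstd_level payload_len profile) := by unfold Pre_select_zstd_level; infer_instance

def pvWitness_select_zstd_level : Int × String := (100000, "Balanced")

def Spec_select_zstd_level (payload_len : Int) (profile : String) (out : Int) : Prop := out = select_zstd_level_alt payload_len profile
instance (payload_len : Int) (profile : String) (out : Int) : Decidable (Spec_select_zstd_level payload_len profile out) := by unfold Spec_select_zstd_level; infer_instance

-- ===== CLAIM (what is proved, stated in full; the proofs are below) =====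
def Claim_equal_select_zstd_level : Prop := ∀ (payload_len : Int) (profile : String), Dom_select_zstd_level payload_len profile → Pre_select_zstd_level payload_len profile → Spec_select_zstd_level payload_len profile (select_zstd_level payload_len profile)

-- ===== LEMMAS AND PROOFS =====
-- core arithmetic fact: for one profile's table, A's range scan and B's band index agree
theorem pv_band_agree (p a b c d : Int) (hp : 0 ≤ p)
    (ha : 1 ≤ a ∧ a ≤ 22) (hb : 1 ≤ b ∧ b ≤ 22) (hc : 1 ≤ c ∧ c ≤ 22) (hd : 1 ≤ d ∧ d ≤ 22)
    (fb : Int) :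
    (match pvScanA p [(0, some 65536, a), (65536, some 524288, b), (524288, some 4194304, c), (4194304, none, d)] with
     | some r => r
     | none => fb) =
    (let idx : Int := (([(65536 : Int), 524288, 4194304].filter (fun t => p ≥ t)).length : Int)
     let level := (PySem.List.pyGet? [a, b, c, d] idx).getD 0
     if 1 ≤ level ∧ level ≤ 22 then level else 0) := by
  rcases lt_or_ge p 65536 with h1 | h1
  · simp [pvScanA, pvClampA, List.filter, PySem.List.pyGet?, PySem.List.pyIdx?,
      hp, h1, show ¬(65536 ≤ p) from by omega, show ¬(524288 ≤ p) from by omega,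
      show ¬(4194304 ≤ p) from by omega, ha.1, ha.2]
  · rcases lt_or_ge p 524288 with h2 | h2
    · simp [pvScanA, pvClampA, List.filter, PySem.List.pyGet?, PySem.List.pyIdx?,
        hp, h1, h2, show ¬(p < 65536) from by omega, show ¬(524288 ≤ p) from by omega,
        show ¬(4194304 ≤ p) from by omega, hb.1, hb.2]
    · rcases lt_or_ge p 4194304 with h3 | h3
      · simp [pvScanA, pvClampA, List.filter, PySem.List.pyGet?, PySem.List.pyIdx?,
          hp, h1, h2, h3, show ¬(p < 65536) from by omega, show ¬(p < 524288) from by omega,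
          show ¬(4194304 ≤ p) from by omega, hc.1, hc.2]
      · simp [pvScanA, pvClampA, List.filter, PySem.List.pyGet?, PySem.List.pyIdx?,
          hp, h1, h2, h3, show ¬(p < 65536) from by omega, show ¬(p < 524288) from by omega,
          show ¬(p < 4194304) from by omega, hd.1, hd.2]

-- ===== VERDICT (by name: the statement is the Claim_ definition above) =====
theorem select_zstd_level_spec : Claim_equal_select_zstd_level := by
  intro p s _ hpre
  obtain ⟨hp, hs⟩ := hpre
  unfold Spec_select_zstd_level select_zstd_level select_zstd_level_alt
  rw [if_neg (by omega), if_neg (by omega)]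
  rcases hs with h | h | h
  · rw [h, show PySem.Dict.get? pvProfilesA "fast" = some [(0, some 65536, 1), (65536, some 524288, 2), (524288, some 4194304, 3), (4194304, none, 4)] from rfl,
        show PySem.Dict.get? pvLevelsB "fast" = some [1, 2, 3, 4] from rfl]
    exact pv_band_agree p 1 2 3 4 hp (by omega) (by omega) (by omega) (by omega) _
  · rw [h, show PySem.Dict.get? pvProfilesA "balanced" = some [(0, some 65536, 3), (65536, some 524288, 5), (524288, some 4194304, 7), (4194304, none, 9)] from rfl,
        show PySem.Dict.get? pvLevelsB "balanced" = some [3, 5, 7, 9] from rfl]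
    exact pv_band_agree p 3 5 7 9 hp (by omega) (by omega) (by omega) (by omega) _
  · rw [h, show PySem.Dict.get? pvProfilesA "compact" = some [(0, some 65536, 7), (65536, some 524288, 11), (524288, some 4194304, 15), (4194304, none, 19)] from rfl,
        show PySem.Dict.get? pvLevelsB "compact" = some [7, 11, 15, 19] from rfl]
    exact pv_band_agree p 7 11 15 19 hp (by omega) (by omega) (by omega) (by omega) _
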